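-- pv_equiv track=rewrite | github.com/TechnicolorGUO/OptiSurvey | src/demo/asg_latex.py | _remove_div_blocks
-- ===== SOURCE A (Python) =====
-- def _remove_div_blocks(lines):
--     """
--     从给定的行列表中，移除所有形如:
--       <div style="...">
--           ... (若干行)
--       </div>
--     的 HTML 块（含首尾 <div> ... </div>）整段跳过。
--     返回处理后的新行列表。
--     """
--     new_lines = []
--     i = 0
--     n = len(lines)
--
--     while i < n:
--         line = lines[i]
--         # 如果该行以 <div style= 开头，则进入跳过模式
--         if line.strip().startswith("<div style="):
--             # 跳过本行
--             i += 1
--             # 一直向后找，直到遇到 '</div>' 行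
--             while i < n and not lines[i].strip().startswith("</div>"):
--                 i += 1
--             # 这里再跳过 '</div>' 那一行
--             i += 1
--         else:
--             new_lines.append(line)
--             i += 1
--
--     return new_lines
-- ===== SOURCE B (Python) =====
-- def _remove_div_blocks(lines):
--     # Two-pass: first compute a keep-mask with a state flag, then filter by it.
--     keep = []
--     inside = False
--     for line in lines:
--         s = line.strip()
--         if inside:
--             keep.append(False)
--             if s.startswith("</div>"):
--                 inside = False
--         elif s.startswith("<div style="):
--             keep.append(False)
--             inside = True
--         else:
--             keep.append(True)
--     return [line for line, k in zip(lines, keep) if k]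
-- ===== Notes on version B (the rewrite author's own statement) =====
-- stated objective: alternative
-- what changed: Replaces the index-driven while loop with a nested skip-ahead inner while by a two-pass scheme: one forward pass computes a boolean keep-mask via an inside-block flag, then a second pass filters the lines by that mask.
import Mathlib
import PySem

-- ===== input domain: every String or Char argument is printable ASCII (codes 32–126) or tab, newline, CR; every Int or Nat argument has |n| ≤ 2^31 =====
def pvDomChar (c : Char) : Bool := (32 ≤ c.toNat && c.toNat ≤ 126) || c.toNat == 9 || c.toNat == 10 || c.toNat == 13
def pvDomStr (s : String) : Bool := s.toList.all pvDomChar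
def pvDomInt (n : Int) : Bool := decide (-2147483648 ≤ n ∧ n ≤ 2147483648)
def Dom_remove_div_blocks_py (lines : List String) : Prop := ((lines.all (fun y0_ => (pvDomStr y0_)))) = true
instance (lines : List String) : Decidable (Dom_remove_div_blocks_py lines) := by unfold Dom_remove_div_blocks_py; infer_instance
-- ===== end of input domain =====

-- B computes a keep-mask in one flagged pass and filters by it, instead of A's index loop with a nested skip-ahead inner while; same cost, different decomposition.

-- ===== PORT A =====
-- inner while: 'while i < n and not lines[i].strip().startswith("</div>"): i += 1' then 'i += 1',
-- expressed on the suffix of lines starting at i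
def pvSkipA : List String → List String
  | [] => []
  | l :: rest =>
    if PySem.Str.startswith (PySem.Str.strip l) "</div>" then rest else pvSkipA rest

-- termination helper for the outer loop (the inner while never lengthens the suffix)
theorem pvSkipA_length_le (xs : List String) : (pvSkipA xs).length ≤ xs.length := by
  induction xs with
  | nil => simp [pvSkipA]
  | cons l rest ih =>
    simp only [pvSkipA]
    split
    · simp
    · exact Nat.le_succ_of_le ih

def remove_div_blocks_py (lines : List String) : List String :=
  match lines with
  | [] => []
  | l :: rest =>
    if PySem.Str.startswith (PySem.Str.strip l) "<div style=" then
      remove_div_blocks_py (pvSkipA rest)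
    else
      l :: remove_div_blocks_py rest
termination_by lines.length
decreasing_by
  · exact Nat.lt_succ_of_le (pvSkipA_length_le rest)
  · simp

-- ===== PORT B =====
-- pass 1: the keep-mask, driven by the 'inside' flag
def pvMaskB : Bool → List String → List Bool
  | _, [] => []
  | inside, l :: rest =>
    let s := PySem.Str.strip l
    if inside then
      false :: pvMaskB (!PySem.Str.startswith s "</div>") rest
    else if PySem.Str.startswith s "<div style=" then
      false :: pvMaskB true rest
    else
      true :: pvMaskB false rest

def remove_div_blocks_py_alt (lines : List String) : List String :=
  -- pass 2: [line for line, k in zip(lines, keep) if k]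
  (lines.zip (pvMaskB false lines)).filterMap (fun p => if p.2 then some p.1 else none)

-- ===== PRECONDITION & SPEC =====
def Spec_remove_div_blocks_py (lines : List String) (out : List String) : Prop := out = remove_div_blocks_py_alt lines
instance (lines : List String) (out : List String) : Decidable (Spec_remove_div_blocks_py lines out) := by unfold Spec_remove_div_blocks_py; infer_instance

-- ===== CLAIM (what is proved, stated in full; the proofs are below) =====
def Claim_equal_remove_div_blocks_py : Prop := ∀ (lines : List String), Dom_remove_div_blocks_py lines → Spec_remove_div_blocks_py lines (remove_div_blocks_py lines)

-- ===== LEMMAS AND PROOFS =====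

-- abbreviation for B's second pass
def pvFilt (xs : List String) (m : List Bool) : List String :=
  (xs.zip m).filterMap (fun p => if p.2 then some p.1 else none)

-- inside-mode of B drops everything up to and including the first '</div>' line,
-- exactly the suffix A's inner while jumps to
theorem pvFilt_mask_true (xs : List String) :
    pvFilt xs (pvMaskB true xs) = pvFilt (pvSkipA xs) (pvMaskB false (pvSkipA xs)) := by
  induction xs with
  | nil => rfl
  | cons l rest ih =>
    by_cases h : PySem.Str.startswith (PySem.Str.strip l) "</div>" = true <;> simp at h
    · simp [pvMaskB, pvSkipA, pvFilt, h]
    · simp only [pvMaskB, pvSkipA]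
      simp [h, pvFilt] at ih ⊢
      exact ih

theorem pv_main (xs : List String) :
    remove_div_blocks_py xs = pvFilt xs (pvMaskB false xs) := by
  induction xs using remove_div_blocks_py.induct with
  | case1 => simp [remove_div_blocks_py, pvFilt, pvMaskB]
  | case2 l rest h ih =>
    rw [remove_div_blocks_py]
    have hb := pvFilt_mask_true rest
    simp at h
    simp only [pvMaskB]
    simp [h, pvFilt] at hb ih ⊢
    exact ih.trans hb.symm
  | case3 l rest h ih =>
    rw [remove_div_blocks_py]
    simp at h
    simp [pvMaskB, pvFilt, h, ih]

-- ===== VERDICT (by name: the statement is the Claim_ definition above) =====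
theorem remove_div_blocks_py_spec : Claim_equal_remove_div_blocks_py := by
  intro lines _
  exact pv_main lines
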